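-- pv_equiv track=rewrite | github.com/sla2yer/fruity_quantum_flyway_brain_simulator | src/flywire_wave/geometry_contract.py | _bundle_status
-- ===== SOURCE A (Python) =====
-- from collections.abc import Mapping
--
-- ASSET_STATUS_READY = "ready"
--
-- ASSET_STATUS_MISSING = "missing"
--
-- ASSET_STATUS_SKIPPED = "skipped"
--
-- def _bundle_status(asset_statuses: Mapping[str, str]) -> str:
--     statuses = [str(status) for status in asset_statuses.values()]
--     if statuses and all(status in {ASSET_STATUS_READY, ASSET_STATUS_SKIPPED} for status in statuses):
--         return ASSET_STATUS_READY
--     if any(status == ASSET_STATUS_READY for status in statuses):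
--         return "partial"
--     if statuses and all(status == ASSET_STATUS_SKIPPED for status in statuses):
--         return ASSET_STATUS_SKIPPED
--     if statuses and any(status == ASSET_STATUS_SKIPPED for status in statuses):
--         if all(status in {ASSET_STATUS_MISSING, ASSET_STATUS_SKIPPED} for status in statuses):
--             return ASSET_STATUS_MISSING
--     return ASSET_STATUS_MISSING
-- ===== SOURCE B (Python) =====
-- ASSET_STATUS_READY = "ready"
-- ASSET_STATUS_MISSING = "missing"
-- ASSET_STATUS_SKIPPED = "skipped"
--
-- def _bundle_status(asset_statuses):
--     n = n_ready = n_skipped = 0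
--     for status in asset_statuses.values():
--         s = str(status)
--         n += 1
--         if s == ASSET_STATUS_READY:
--             n_ready += 1
--         elif s == ASSET_STATUS_SKIPPED:
--             n_skipped += 1
--     if n > 0 and n_ready + n_skipped == n:
--         return ASSET_STATUS_READY
--     if n_ready >= 1:
--         return "partial"
--     if n > 0 and n_skipped == n:
--         return ASSET_STATUS_SKIPPED
--     return ASSET_STATUS_MISSING
-- ===== Notes on version B (the rewrite author's own statement) =====
-- stated objective: alternative
-- what changed: Replaces A's five separate all/any scans over the status list by a single pass that tallies total/ready/skipped counts, then decides the bundle status by arithmetic on the counts.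
import Mathlib
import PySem

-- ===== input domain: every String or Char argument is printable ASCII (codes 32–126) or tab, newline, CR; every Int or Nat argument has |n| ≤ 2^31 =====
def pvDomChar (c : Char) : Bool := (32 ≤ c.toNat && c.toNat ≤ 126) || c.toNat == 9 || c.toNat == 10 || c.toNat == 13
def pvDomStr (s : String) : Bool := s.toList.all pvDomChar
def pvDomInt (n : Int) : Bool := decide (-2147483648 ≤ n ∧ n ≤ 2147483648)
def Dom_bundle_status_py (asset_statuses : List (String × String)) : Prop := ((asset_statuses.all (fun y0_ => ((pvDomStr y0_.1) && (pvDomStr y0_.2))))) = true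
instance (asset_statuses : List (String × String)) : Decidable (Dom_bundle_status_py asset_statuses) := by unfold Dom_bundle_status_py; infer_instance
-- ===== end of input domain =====

-- B replaces A's repeated all/any scans of the status list by one counting pass plus arithmetic on the counts (alternative decomposition).

-- ===== PORT A =====
-- str(status) on a str is the identity, so the list comprehension is ported as the dict's values list itself.
def bundle_status_py (asset_statuses : List (String × String)) : String :=
  let statuses := (PySem.Dict.ofList asset_statuses).values
  if !statuses.isEmpty && statuses.all (fun s => s == "ready" || s == "skipped") then "ready"
  else if statuses.any (fun s => s == "ready") then "partial"
  else if !statuses.isEmpty && statuses.all (fun s => s == "skipped") then "skipped"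
  else if !statuses.isEmpty && statuses.any (fun s => s == "skipped") then
    (if statuses.all (fun s => s == "missing" || s == "skipped") then "missing" else "missing")
  else "missing"

-- ===== PORT B =====
-- the single counting pass of Source B: state (n, n_ready, n_skipped)
def bundle_status_py_alt (asset_statuses : List (String × String)) : String :=
  let t := (PySem.Dict.ofList asset_statuses).values.foldl
    (fun (acc : Nat × Nat × Nat) s =>
      if s == "ready" then (acc.1 + 1, acc.2.1 + 1, acc.2.2)
      else if s == "skipped" then (acc.1 + 1, acc.2.1, acc.2.2 + 1)
      else (acc.1 + 1, acc.2.1, acc.2.2)) (0, 0, 0)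
  if t.1 > 0 && t.2.1 + t.2.2 == t.1 then "ready"
  else if t.2.1 ≥ 1 then "partial"
  else if t.1 > 0 && t.2.2 == t.1 then "skipped"
  else "missing"

-- ===== PRECONDITION & SPEC =====
def Spec_bundle_status_py (asset_statuses : List (String × String)) (out : String) : Prop := out = bundle_status_py_alt asset_statuses
instance (asset_statuses : List (String × String)) (out : String) : Decidable (Spec_bundle_status_py asset_statuses out) := by unfold Spec_bundle_status_py; infer_instance

-- ===== CLAIM (what is proved, stated in full; the proofs are below) =====
def Claim_equal_bundle_status_py : Prop := ∀ (asset_statuses : List (String × String)), Dom_bundle_status_py asset_statuses → Spec_bundle_status_py asset_statuses (bundle_status_py asset_statuses)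

-- ===== LEMMAS AND PROOFS =====

-- B's counting fold computes (length, count of "ready", count of "skipped")
theorem pv_fold_counts (l : List String) (a b c : Nat) :
    l.foldl (fun (acc : Nat × Nat × Nat) s =>
      if s == "ready" then (acc.1 + 1, acc.2.1 + 1, acc.2.2)
      else if s == "skipped" then (acc.1 + 1, acc.2.1, acc.2.2 + 1)
      else (acc.1 + 1, acc.2.1, acc.2.2)) (a, b, c)
    = (a + l.length, b + l.countP (· == "ready"), c + l.countP (· == "skipped")) := by
  induction l generalizing a b c with
  | nil => simp
  | cons x xs ih =>
    rw [List.foldl_cons]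
    by_cases hr : x == "ready"
    · have hs : (x == "skipped") = false := by
        have := eq_of_beq hr; subst this; decide
      simp only [hr, hs, if_true, Bool.false_eq_true, if_false, List.countP_cons,
        List.length_cons, ih, Prod.mk.injEq]
      refine ⟨by omega, by omega, by omega⟩
    · by_cases hs : x == "skipped"
      · simp only [Bool.not_eq_true] at hr
        simp only [hr, hs, if_true, Bool.false_eq_true, if_false, List.countP_cons,
          List.length_cons, ih, Prod.mk.injEq]
        refine ⟨by omega, by omega, by omega⟩
      · simp only [Bool.not_eq_true] at hr hs
        simp only [hr, hs, Bool.false_eq_true, if_false, List.countP_cons,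
          List.length_cons, ih, Prod.mk.injEq]
        refine ⟨by omega, by omega, by omega⟩

-- "ready" and "skipped" are distinct, so the membership count splits into the two counts
theorem pv_countP_or (l : List String) :
    l.countP (fun s => s == "ready" || s == "skipped")
    = l.countP (· == "ready") + l.countP (· == "skipped") := by
  induction l with
  | nil => rfl
  | cons x xs ih =>
    by_cases hr : x == "ready"
    · have hs : (x == "skipped") = false := by
        have := eq_of_beq hr; subst this; decide
      simp [hr, hs, ih]; omega
    · by_cases hs : x == "skipped"
      · simp [hr, hs, ih]; omega
      · simp [hr, hs, ih]

-- A's scan-based decision equals B's count-based decision, for any list of statuses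
theorem pv_core_eq (l : List String) :
    (if !l.isEmpty && l.all (fun s => s == "ready" || s == "skipped") then "ready"
     else if l.any (fun s => s == "ready") then "partial"
     else if !l.isEmpty && l.all (fun s => s == "skipped") then "skipped"
     else if !l.isEmpty && l.any (fun s => s == "skipped") then
       (if l.all (fun s => s == "missing" || s == "skipped") then "missing" else "missing")
     else "missing")
    =
    (if l.length > 0 && l.countP (· == "ready") + l.countP (· == "skipped") == l.length then "ready"
     else if l.countP (· == "ready") ≥ 1 then "partial"
     else if l.length > 0 && l.countP (· == "skipped") == l.length then "skipped"
     else "missing") := by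
  have hne : l.isEmpty = false ↔ 0 < l.length := by cases l <;> simp
  have h1 : l.all (fun s => s == "ready" || s == "skipped") = true ↔
      l.countP (· == "ready") + l.countP (· == "skipped") = l.length := by
    rw [← pv_countP_or, List.countP_eq_length, List.all_eq_true]
  have h2 : l.any (fun s => s == "ready") = true ↔ 1 ≤ l.countP (· == "ready") := by
    constructor
    · intro h; obtain ⟨x, hx, hp⟩ := List.any_eq_true.1 h
      exact List.countP_pos_iff.2 ⟨x, hx, hp⟩
    · intro h; obtain ⟨x, hx, hp⟩ := List.countP_pos_iff.1 h
      exact List.any_eq_true.2 ⟨x, hx, hp⟩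
  have h3 : l.all (fun s => s == "skipped") = true ↔ l.countP (· == "skipped") = l.length := by
    rw [List.countP_eq_length, List.all_eq_true]
  split_ifs with c1 c2 c3 c4 c5 c6 c7 c8 c9 c10 <;>
    simp_all [Bool.and_eq_true]
  · obtain ⟨x, hx, hxs⟩ := ‹∃ x ∈ l, ¬x = "skipped"›
    exact hxs (c9.2 x hx)
  · obtain ⟨x, hx, hxr, hxs⟩ := h1
    exact hxs (‹0 < l.length ∧ ∀ a ∈ l, a = "skipped"›.2 x hx)

-- ===== VERDICT (by name: the statement is the Claim_ definition above) =====
theorem bundle_status_py_spec : Claim_equal_bundle_status_py := by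
  intro l _
  unfold Spec_bundle_status_py bundle_status_py bundle_status_py_alt
  rw [pv_fold_counts]
  simpa only [Nat.zero_add] using pv_core_eq (PySem.Dict.ofList l).values
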